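-- pv_equiv track=rewrite | github.com/qiqi-impact/cp | other/vamsi-amazon.py | number_max_profit_groups
-- ===== SOURCE A (Python) =====
-- class DisjointSetUnion:
--     def __init__(self, n):
--         self.parent = list(range(n))
--         self.size = [1] * n
--         self.num_sets = n
--
--     def find(self, a):
--         acopy = a
--         while a != self.parent[a]:
--             a = self.parent[a]
--         while acopy != a:
--             self.parent[acopy], acopy = a, self.parent[acopy]
--         return a
--
--     def union(self, a, b):
--         a, b = self.find(a), self.find(b)
--         if a != b:
--             if a > b:
--                 a, b = b, a
--
--             self.num_sets -= 1
--             self.parent[b] = a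
--             self.size[a] += self.size[b]
--
--     def set_size(self, a):
--         return self.size[self.find(a)]
--
--     def __len__(self):
--         return self.num_sets
--
-- def number_max_profit_groups(arr):
--     n = len(arr)
--     l = sorted(zip(arr, range(n)))
--     uf = DisjointSetUnion(n)
--     vis = [0] * n
--     ret = 0
--     for x, i in l:
--         vis[i] = 1
--         for j in i-1, i+1:
--             if 0 <= j < n and vis[j]:
--                 uf.union(i, j)
--         L = uf.find(i)
--         R = L + uf.set_size(i) - 1
--         ret += (i - L + 1) * (R - i + 1)
--     return ret
-- ===== SOURCE B (Python) =====
-- def number_max_profit_groups(arr):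
--     n = len(arr)
--     return n * (n + 1) // 2
-- ===== Notes on version B (the rewrite author's own statement) =====
-- stated objective: faster
-- what changed: Replaced the sort + disjoint-set-union sweep with the closed form n*(n+1)//2: each insertion in value order adds exactly the number of subarrays whose maximum is the inserted element, so the total is the number of all subarrays, which depends only on len(arr).
import Mathlib
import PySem

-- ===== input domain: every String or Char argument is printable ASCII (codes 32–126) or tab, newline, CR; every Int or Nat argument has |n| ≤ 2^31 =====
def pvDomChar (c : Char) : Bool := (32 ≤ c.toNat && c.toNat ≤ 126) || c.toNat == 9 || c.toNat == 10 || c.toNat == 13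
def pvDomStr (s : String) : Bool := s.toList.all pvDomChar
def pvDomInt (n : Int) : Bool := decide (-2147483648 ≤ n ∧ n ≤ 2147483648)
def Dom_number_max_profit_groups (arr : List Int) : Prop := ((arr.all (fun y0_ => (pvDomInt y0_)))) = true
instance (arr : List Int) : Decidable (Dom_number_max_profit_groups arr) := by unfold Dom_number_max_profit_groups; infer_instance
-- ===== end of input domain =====

-- B replaces A's sort + disjoint-set-union sweep by the closed form n*(n+1)//2 (objective: faster;
-- A's sum counts every subarray exactly once, so it depends only on len(arr)).

-- ===== PORT A =====
-- Indexing helpers: in A's run every index read/written is in range, so `.getD 0` / the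
-- range guard of pvSetI only totalize the functions (exactness on the executed inputs).
def pvGetI (xs : List Int) (i : Int) : Int := (PySem.List.pyGet? xs i).getD 0
def pvSetI (xs : List Int) (i : Int) (v : Int) : List Int :=
  if 0 ≤ i ∧ i.toNat < xs.length then xs.set i.toNat v else xs

-- `while a != self.parent[a]: a = self.parent[a]` — fuel = len(parent) suffices since the
-- parent chain strictly decreases (proved in the invariant lemmas below).
def pvFindRoot (parent : List Int) : Nat → Int → Int
  | 0, a => a
  | fuel+1, a => if pvGetI parent a = a then a else pvFindRoot parent fuel (pvGetI parent a)

-- `while acopy != a: self.parent[acopy], acopy = a, self.parent[acopy]`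
def pvCompress : Nat → List Int → Int → Int → List Int
  | 0, parent, _, _ => parent
  | fuel+1, parent, acopy, root =>
      if acopy = root then parent
      else pvCompress fuel (pvSetI parent acopy root) (pvGetI parent acopy) root

def pvFind (parent : List Int) (a : Int) : Int × List Int :=
  let r := pvFindRoot parent parent.length a
  (r, pvCompress parent.length parent a r)

def pvUnion (parent size : List Int) (numSets : Int) (a b : Int) :
    List Int × List Int × Int :=
  let fa := pvFind parent a
  let fb := pvFind fa.2 b
  let a' := fa.1
  let b' := fb.1
  if a' ≠ b' then
    let s := if a' > b' then b' else a'
    let t := if a' > b' then a' else b'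
    (pvSetI fb.2 t s, pvSetI size s (pvGetI size s + pvGetI size t), numSets - 1)
  else (fb.2, size, numSets)

-- body of `if 0 <= j < n and vis[j]: uf.union(i, j)`
def pvInner (n : Int) (parent size : List Int) (numSets : Int) (vis : List Int) (i j : Int) :
    List Int × List Int × Int :=
  if 0 ≤ j ∧ j < n ∧ pvGetI vis j ≠ 0 then pvUnion parent size numSets i j
  else (parent, size, numSets)

-- one iteration of `for x, i in l` (state: parent, size, num_sets, vis, ret)
def pvStep (n : Int) (st : List Int × List Int × Int × List Int × Int) (xi : Int × Int) :
    List Int × List Int × Int × List Int × Int :=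
  let i := xi.2
  let vis1 := pvSetI st.2.2.2.1 i 1
  let u1 := pvInner n st.1 st.2.1 st.2.2.1 vis1 i (i-1)
  let u2 := pvInner n u1.1 u1.2.1 u1.2.2 vis1 i (i+1)
  let f1 := pvFind u2.1 i
  let L := f1.1
  let f2 := pvFind f1.2 i          -- uf.set_size(i) calls find again
  let R := L + pvGetI u2.2.1 f2.1 - 1
  (f2.2, u2.2.1, u2.2.2, vis1, st.2.2.2.2 + (i - L + 1) * (R - i + 1))

def number_max_profit_groups (arr : List Int) : Int :=
  let n : Int := arr.length
  let l := PySem.List.sorted2 (arr.zip (PySem.List.pyRange 0 n 1)) (fun p => p.1) (fun p => p.2)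
  let init := (PySem.List.pyRange 0 n 1, List.replicate arr.length (1:Int), n,
               List.replicate arr.length (0:Int), (0:Int))
  (l.foldl (pvStep n) init).2.2.2.2

-- ===== PORT B =====
def number_max_profit_groups_alt (arr : List Int) : Int :=
  let n : Int := arr.length
  PySem.Int.floordiv (n * (n + 1)) 2

-- ===== PRECONDITION & SPEC =====
def Spec_number_max_profit_groups (arr : List Int) (out : Int) : Prop := out = number_max_profit_groups_alt arr
instance (arr : List Int) (out : Int) : Decidable (Spec_number_max_profit_groups arr out) := by unfold Spec_number_max_profit_groups; infer_instance

-- ===== CLAIM (what is proved, stated in full; the proofs are below) =====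
def Claim_equal_number_max_profit_groups : Prop := ∀ (arr : List Int), Dom_number_max_profit_groups arr → Spec_number_max_profit_groups arr (number_max_profit_groups arr)

-- ===== LEMMAS AND PROOFS =====

-- ---------- proof-side model definitions ----------


-- computable integer interval finset (Mathlib's Finset.Icc on ℤ is noncomputable here)
def IccZ (a b : Int) : Finset ℤ := (Finset.range (b+1-a).toNat).image (fun k : ℕ => a + (k:ℤ))

theorem mem_IccZ (a b x : Int) : x ∈ IccZ a b ↔ a ≤ x ∧ x ≤ b := by
  simp only [IccZ, Finset.mem_image, Finset.mem_range]
  constructor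
  · rintro ⟨k, hk, rfl⟩; omega
  · rintro ⟨h1, h2⟩; exact ⟨(x-a).toNat, by omega, by omega⟩

theorem IccZ_card (a b : Int) : (IccZ a b).card = (b + 1 - a).toNat := by
  rw [IccZ, Finset.card_image_of_injective _ (fun x y hxy => by omega), Finset.card_range]

-- interval partition of [0,n): ρ maps every index to the left end of its block
def IPart (n : Int) (rho : Int → Int) : Prop :=
  ∀ j, 0 ≤ j → j < n → 0 ≤ rho j ∧ rho j ≤ j ∧ ∀ k, rho j ≤ k → k ≤ j → rho k = rho j

def blkCard (n : Int) (rho : Int → Int) (r : Int) : ℕ :=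
  ((IccZ 0 (n-1)).filter (fun j => rho j = r)).card

-- the DSU invariant: parent chains stay inside the block and reach its root, sizes are block sizes
def DSUInv (n : Int) (rho : Int → Int) (parent size : List Int) : Prop :=
  parent.length = n.toNat ∧ size.length = n.toNat ∧ IPart n rho ∧
  (∀ j, 0 ≤ j → j < n →
     rho (pvGetI parent j) = rho j ∧ rho j ≤ pvGetI parent j ∧ pvGetI parent j ≤ j ∧
     (pvGetI parent j = j ↔ rho j = j)) ∧
  (∀ r, 0 ≤ r → r < n → rho r = r → pvGetI size r = blkCard n rho r)

-- left end of the visited run containing j (fuel-bounded walk down)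
def runL (V : Finset ℤ) : Nat → Int → Int
  | 0, j => j
  | f+1, j => if (j-1) ∈ V then runL V f (j-1) else j

def rhoV (V : Finset ℤ) (j : Int) : Int := if j ∈ V then runL V j.toNat j else j

-- number of intervals [a,b] ⊆ [0,n) entirely inside V
def countIv (n : Int) (V : Finset ℤ) : Int :=
  ((((IccZ 0 (n-1)) ×ˢ (IccZ 0 (n-1))).filter
      (fun p => p.1 ≤ p.2 ∧ IccZ p.1 p.2 ⊆ V)).card : ℤ)

def FullInv (n : Int) (V : Finset ℤ) (st : List Int × List Int × Int × List Int × Int) : Prop :=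
  (∀ x ∈ V, 0 ≤ x ∧ x < n) ∧ st.2.2.2.1.length = n.toNat ∧
  (∀ j, 0 ≤ j → j < n → pvGetI st.2.2.2.1 j = (if j ∈ V then 1 else 0)) ∧
  DSUInv n (rhoV V) st.1 st.2.1 ∧ st.2.2.2.2 = countIv n V

-- ---------- indexing basics ----------

theorem pvSetI_length (xs : List Int) (i v : Int) : (pvSetI xs i v).length = xs.length := by
  unfold pvSetI; split <;> simp

theorem pvGetI_eq_getElem (xs : List Int) (i : Int) (h0 : 0 ≤ i) (h : i.toNat < xs.length) :
    pvGetI xs i = xs[i.toNat] := by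
  unfold pvGetI
  rw [PySem.List.pyGet?_of_nonneg _ h0]
  simp [List.getElem?_eq_getElem h]

theorem pvGetI_pvSetI_self (xs : List Int) (i v : Int) (h0 : 0 ≤ i) (h : i.toNat < xs.length) :
    pvGetI (pvSetI xs i v) i = v := by
  unfold pvGetI pvSetI
  rw [if_pos ⟨h0, h⟩, PySem.List.pyGet?_of_nonneg _ h0]
  simp [h]

theorem pvGetI_pvSetI_ne (xs : List Int) (i v j : Int) (h0 : 0 ≤ j) (hji : j ≠ i) :
    pvGetI (pvSetI xs i v) j = pvGetI xs j := by
  unfold pvGetI pvSetI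
  split
  · next hc =>
      rw [PySem.List.pyGet?_of_nonneg _ h0, PySem.List.pyGet?_of_nonneg _ h0,
        List.getElem?_set_ne (by omega)]
  · rfl

-- ---------- rhoV facts ----------

theorem runL_spec (V : Finset ℤ) (hV : ∀ x ∈ V, 0 ≤ x) :
    ∀ (fuel : Nat) (j : Int), 0 ≤ j → j ≤ (fuel : Int) →
      runL V fuel j ≤ j ∧ 0 ≤ runL V fuel j ∧
      (∀ k, runL V fuel j ≤ k → k < j → k ∈ V) ∧ (runL V fuel j - 1) ∉ V := by
  intro fuel
  induction fuel with
  | zero =>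
      intro j h0 hle
      have hj : j = 0 := by omega
      subst hj
      simp only [runL]
      exact ⟨le_refl _, le_refl _, fun k hk1 hk2 => by omega, fun h => by have := hV _ h; omega⟩
  | succ f ih =>
      intro j h0 hle
      by_cases hmem : (j-1) ∈ V
      · have h1 : 0 ≤ j - 1 := by have := hV _ hmem; omega
        have ⟨a1, a2, a3, a4⟩ := ih (j-1) h1 (by omega)
        rw [runL, if_pos hmem]
        refine ⟨by omega, a2, ?_, a4⟩
        intro k hk1 hk2
        rcases lt_or_ge k (j-1) with h | h
        · exact a3 k hk1 h
        · have : k = j - 1 := by omega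
          rw [this]; exact hmem
      · rw [runL, if_neg hmem]
        exact ⟨le_refl _, h0, fun k hk1 hk2 => by omega, hmem⟩

theorem rhoV_mem_spec (V : Finset ℤ) (hV : ∀ x ∈ V, 0 ≤ x) (j : Int) (hj : j ∈ V) :
    rhoV V j ≤ j ∧ 0 ≤ rhoV V j ∧
    (∀ k, rhoV V j ≤ k → k ≤ j → k ∈ V) ∧ (rhoV V j - 1) ∉ V := by
  have h0 : 0 ≤ j := hV _ hj
  have ⟨a1, a2, a3, a4⟩ := runL_spec V hV j.toNat j h0 (by omega)
  rw [rhoV, if_pos hj] at *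
  refine ⟨a1, a2, ?_, a4⟩
  intro k hk1 hk2
  rcases lt_or_ge k j with h | h
  · exact a3 k hk1 h
  · have : k = j := by omega
    rw [this]; exact hj

theorem rhoV_not_mem (V : Finset ℤ) (j : Int) (hj : j ∉ V) : rhoV V j = j := by
  rw [rhoV, if_neg hj]

theorem rhoV_char (V : Finset ℤ) (hV : ∀ x ∈ V, 0 ≤ x) (j L : Int)
    (hL : L ≤ j) (hsub : ∀ k, L ≤ k → k ≤ j → k ∈ V) (hL1 : (L-1) ∉ V) :
    rhoV V j = L := by
  have hjV : j ∈ V := hsub j hL (le_refl _)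
  have ⟨a1, a2, a3, a4⟩ := rhoV_mem_spec V hV j hjV
  by_contra hne
  rcases lt_or_ge (rhoV V j) L with h | h
  · exact hL1 (a3 (L-1) (by omega) (by omega))
  · exact a4 (hsub (rhoV V j - 1) (by omega) (by omega))

theorem rhoV_congr_run (V : Finset ℤ) (hV : ∀ x ∈ V, 0 ≤ x) (j k : Int) (hj : j ∈ V)
    (hk : rhoV V j ≤ k) (hkj : k ≤ j) : rhoV V k = rhoV V j := by
  have ⟨a1, a2, a3, a4⟩ := rhoV_mem_spec V hV j hj
  exact rhoV_char V hV k (rhoV V j) hk (fun m hm1 hm2 => a3 m hm1 (by omega)) a4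

theorem IPart_rhoV (n : Int) (V : Finset ℤ) (hV : ∀ x ∈ V, 0 ≤ x) : IPart n (rhoV V) := by
  intro j h0 hn
  by_cases hj : j ∈ V
  · have ⟨a1, a2, a3, a4⟩ := rhoV_mem_spec V hV j hj
    exact ⟨a2, a1, fun k hk1 hk2 => rhoV_congr_run V hV j k hj hk1 hk2⟩
  · rw [rhoV_not_mem V j hj]
    exact ⟨h0, le_refl _, fun k hk1 hk2 => by have : k = j := le_antisymm hk2 hk1; rw [this, rhoV_not_mem V j hj]⟩

-- ---------- DSU lemmas ----------

theorem DSUInv_congr (n : Int) (r1 r2 : Int → Int) (parent size : List Int)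
    (h : ∀ j, 0 ≤ j → j < n → r1 j = r2 j) (hinv : DSUInv n r1 parent size) :
    DSUInv n r2 parent size := by
  obtain ⟨hp, hs, hip, hpar, hsz⟩ := hinv
  refine ⟨hp, hs, ?_, ?_, ?_⟩
  · intro j h0 hn
    obtain ⟨b1, b2, b3⟩ := hip j h0 hn
    have hj2 := h j h0 hn
    refine ⟨by omega, by omega, ?_⟩
    intro k hk1 hk2
    have hk0 : 0 ≤ k := by omega
    rw [← h k hk0 (by omega), ← hj2]
    exact b3 k (by omega) hk2
  · intro j h0 hn
    obtain ⟨e1, e2, e3, e4⟩ := hpar j h0 hn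
    obtain ⟨b1, b2, b3⟩ := hip j h0 hn
    rw [← h j h0 hn, ← h (pvGetI parent j) (le_trans b1 e2) (by omega)]
    exact ⟨e1, e2, e3, e4⟩
  · intro r h0 hn hr
    rw [← h r h0 hn] at hr
    rw [hsz r h0 hn hr]
    have hbe : blkCard n r1 r = blkCard n r2 r := by
      unfold blkCard
      congr 1
      apply Finset.filter_congr
      intro j hj
      rw [mem_IccZ] at hj
      rw [h j hj.1 (by omega)]
    rw [hbe]

theorem findRoot_spec (n : Int) (rho : Int → Int) (parent size : List Int)
    (hinv : DSUInv n rho parent size) :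
    ∀ (fuel : Nat) (a : Int), 0 ≤ a → a < n → (a - rho a).toNat < fuel →
      pvFindRoot parent fuel a = rho a := by
  intro fuel
  induction fuel with
  | zero => intro a h0 hn hf; omega
  | succ f ih =>
      intro a h0 hn hf
      obtain ⟨e1, e2, e3, e4⟩ := hinv.2.2.2.1 a h0 hn
      obtain ⟨b1, b2, b3⟩ := hinv.2.2.1 a h0 hn
      rw [pvFindRoot]
      by_cases hc : pvGetI parent a = a
      · rw [if_pos hc]; exact (e4.mp hc).symm
      · rw [if_neg hc]
        have hlt : pvGetI parent a < a := lt_of_le_of_ne e3 hc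
        rw [ih (pvGetI parent a) (le_trans b1 e2) (by omega) (by rw [e1]; omega), e1]

theorem compress_spec (n : Int) (rho : Int → Int) (size : List Int) :
    ∀ (fuel : Nat) (parent : List Int) (acopy root : Int),
      DSUInv n rho parent size → 0 ≤ acopy → acopy < n → rho acopy = root →
      DSUInv n rho (pvCompress fuel parent acopy root) size := by
  intro fuel
  induction fuel with
  | zero => intro parent acopy root hinv _ _ _; exact hinv
  | succ f ih =>
      intro parent acopy root hinv h0 hn hroot
      rw [pvCompress]
      by_cases hc : acopy = root
      · rw [if_pos hc]; exact hinv
      · rw [if_neg hc]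
        obtain ⟨hp, hs, hip, hpar, hsz⟩ := hinv
        obtain ⟨e1, e2, e3, e4⟩ := hpar acopy h0 hn
        obtain ⟨b1, b2, b3⟩ := hip acopy h0 hn
        have hrr : rho root = root := by rw [← hroot]; exact b3 (rho acopy) (le_refl _) b2
        apply ih
        · refine ⟨by rw [pvSetI_length]; exact hp, hs, hip, ?_, ?_⟩
          · intro j hj0 hjn
            by_cases hj : j = acopy
            · subst hj
              rw [pvGetI_pvSetI_self parent j root hj0 (by omega)]
              subst hroot
              exact ⟨hrr, le_refl _, b2, Iff.rfl⟩
            · rw [pvGetI_pvSetI_ne parent acopy root j hj0 hj]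
              exact hpar j hj0 hjn
          · intro r hr0 hrn hr
            exact hsz r hr0 hrn hr
        · exact le_trans b1 e2
        · omega
        · rw [e1, hroot]

theorem find_spec (n : Int) (rho : Int → Int) (parent size : List Int) (a : Int)
    (hinv : DSUInv n rho parent size) (h0 : 0 ≤ a) (hn : a < n) :
    (pvFind parent a).1 = rho a ∧ DSUInv n rho (pvFind parent a).2 size := by
  obtain ⟨b1, b2, b3⟩ := hinv.2.2.1 a h0 hn
  have hp := hinv.1
  have hroot : pvFindRoot parent parent.length a = rho a := by
    apply findRoot_spec n rho parent size hinv parent.length a h0 hn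
    omega
  constructor
  · exact hroot
  · show DSUInv n rho (pvCompress parent.length parent a (pvFindRoot parent parent.length a)) size
    rw [hroot]
    exact compress_spec n rho size parent.length parent a (rho a) hinv h0 hn rfl

def mergeR (rho : Int → Int) (s t : Int) : Int → Int := fun j => if rho j = t then s else rho j

theorem mergeR_of_eq (rho : Int → Int) (s t j : Int) (h : rho j = t) : mergeR rho s t j = s := if_pos h

theorem mergeR_of_ne (rho : Int → Int) (s t j : Int) (h : rho j ≠ t) : mergeR rho s t j = rho j := if_neg h

theorem union_spec (n : Int) (rho : Int → Int) (parent size : List Int) (numSets a b s t : Int)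
    (hinv : DSUInv n rho parent size) (ha0 : 0 ≤ a) (han : a < n) (hb0 : 0 ≤ b) (hbn : b < n)
    (hst : (s = rho a ∧ t = rho b) ∨ (s = rho b ∧ t = rho a)) (hlt : s < t)
    (hblk : ∀ k, s ≤ k → k < t → rho k = s) :
    DSUInv n (mergeR rho s t)
      (pvUnion parent size numSets a b).1 (pvUnion parent size numSets a b).2.1 := by
  have hipa := hinv.2.2.1 a ha0 han
  have hipb := hinv.2.2.1 b hb0 hbn
  have hs0 : 0 ≤ s := by rcases hst with ⟨h1, _⟩ | ⟨h1, _⟩ <;> omega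
  have ht0 : 0 ≤ t := by omega
  have hsn : s < n := by rcases hst with ⟨h1, _⟩ | ⟨h1, _⟩ <;> omega
  have htn : t < n := by rcases hst with ⟨_, h2⟩ | ⟨_, h2⟩ <;> omega
  have hip := hinv.2.2.1
  have hss : rho s = s := by
    rcases hst with ⟨h1, _⟩ | ⟨h1, _⟩
    · rw [h1]; exact (hip a ha0 han).2.2 (rho a) (le_refl _) (hip a ha0 han).2.1
    · rw [h1]; exact (hip b hb0 hbn).2.2 (rho b) (le_refl _) (hip b hb0 hbn).2.1
  have htt : rho t = t := by
    rcases hst with ⟨_, h2⟩ | ⟨_, h2⟩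
    · rw [h2]; exact (hip b hb0 hbn).2.2 (rho b) (le_refl _) (hip b hb0 hbn).2.1
    · rw [h2]; exact (hip a ha0 han).2.2 (rho a) (le_refl _) (hip a ha0 han).2.1
  have hfa := find_spec n rho parent size a hinv ha0 han
  have hfb := find_spec n rho (pvFind parent a).2 size b hfa.2 hb0 hbn
  have hne : (pvFind parent a).1 ≠ (pvFind (pvFind parent a).2 b).1 := by
    rw [hfa.1, hfb.1]
    rcases hst with ⟨h1, h2⟩ | ⟨h1, h2⟩ <;> omega
  have hminmax :
      (if (pvFind parent a).1 > (pvFind (pvFind parent a).2 b).1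
         then (pvFind (pvFind parent a).2 b).1 else (pvFind parent a).1) = s ∧
      (if (pvFind parent a).1 > (pvFind (pvFind parent a).2 b).1
         then (pvFind parent a).1 else (pvFind (pvFind parent a).2 b).1) = t := by
    rw [hfa.1, hfb.1]
    rcases hst with ⟨h1, h2⟩ | ⟨h1, h2⟩ <;> constructor <;> split <;> omega
  have hgoal1 : (pvUnion parent size numSets a b).1 = pvSetI (pvFind (pvFind parent a).2 b).2 t s := by
    unfold pvUnion
    simp only [if_pos hne, hminmax.1, hminmax.2]
  have hgoal2 : (pvUnion parent size numSets a b).2.1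
      = pvSetI size s (pvGetI size s + pvGetI size t) := by
    unfold pvUnion
    simp only [if_pos hne, hminmax.1, hminmax.2]
  rw [hgoal1, hgoal2]
  obtain ⟨hp, hsl, hipP', hpar2, hsz2⟩ := hfb.2
  have hmt : mergeR rho s t t = s := mergeR_of_eq rho s t t htt
  have hms : mergeR rho s t s = s := by
    rw [mergeR_of_ne rho s t s (by omega)]; exact hss
  have hipN : IPart n (mergeR rho s t) := by
    intro j h0 hn
    obtain ⟨b1, b2, b3⟩ := hip j h0 hn
    by_cases hcase : rho j = t
    · rw [mergeR_of_eq rho s t j hcase]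
      refine ⟨hs0, by omega, ?_⟩
      intro k hk1 hk2
      rcases lt_or_ge k t with hk | hk
      · rw [mergeR_of_ne rho s t k (by rw [hblk k hk1 hk]; omega)]
        exact hblk k hk1 hk
      · exact mergeR_of_eq rho s t k (by rw [b3 k (by omega) hk2, hcase])
    · rw [mergeR_of_ne rho s t j hcase]
      refine ⟨b1, b2, ?_⟩
      intro k hk1 hk2
      rw [mergeR_of_ne rho s t k (by rw [b3 k hk1 hk2]; exact hcase)]
      exact b3 k hk1 hk2
  refine ⟨by rw [pvSetI_length]; exact hp, by rw [pvSetI_length]; exact hsl, hipN, ?_, ?_⟩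
  · intro j h0 hn
    by_cases hj : j = t
    · rw [hj, pvGetI_pvSetI_self _ _ _ ht0 (by omega)]
      rw [hms, hmt]
      exact ⟨rfl, le_refl _, by omega, by constructor <;> intro h <;> omega⟩
    · rw [pvGetI_pvSetI_ne _ _ _ _ h0 hj]
      obtain ⟨e1, e2, e3, e4⟩ := hpar2 j h0 hn
      by_cases hcase : rho j = t
      · have hjt : t < j := by
          have := (hip j h0 hn).2.1
          omega
        rw [mergeR_of_eq rho s t j hcase,
            mergeR_of_eq rho s t (pvGetI (pvFind (pvFind parent a).2 b).2 j) (by rw [e1]; exact hcase)]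
        refine ⟨rfl, by omega, e3, ?_⟩
        constructor
        · intro h; exfalso; rw [e4] at h; omega
        · intro h; exfalso; omega
      · rw [mergeR_of_ne rho s t j hcase,
            mergeR_of_ne rho s t (pvGetI (pvFind (pvFind parent a).2 b).2 j) (by rw [e1]; exact hcase)]
        exact ⟨e1, e2, e3, e4⟩
  · intro r hr0 hrn hr
    by_cases hrs : r = s
    · rw [hrs, pvGetI_pvSetI_self _ _ _ hs0 (by omega)]
      rw [hsz2 s hs0 hsn hss, hsz2 t ht0 htn htt]
      have hsplit : (IccZ 0 (n-1)).filter (fun j => mergeR rho s t j = s)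
          = ((IccZ 0 (n-1)).filter (fun j => rho j = s)) ∪ ((IccZ 0 (n-1)).filter (fun j => rho j = t)) := by
        ext x
        simp only [Finset.mem_filter, Finset.mem_union]
        constructor
        · rintro ⟨hx, hcond⟩
          by_cases hxt : rho x = t
          · exact Or.inr ⟨hx, hxt⟩
          · rw [mergeR_of_ne rho s t x hxt] at hcond
            exact Or.inl ⟨hx, hcond⟩
        · rintro (⟨hx, hcond⟩ | ⟨hx, hcond⟩)
          · exact ⟨hx, by rw [mergeR_of_ne rho s t x (by omega)]; exact hcond⟩
          · exact ⟨hx, mergeR_of_eq rho s t x hcond⟩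
      have hdisj : Disjoint ((IccZ 0 (n-1)).filter (fun j => rho j = s))
          ((IccZ 0 (n-1)).filter (fun j => rho j = t)) := by
        rw [Finset.disjoint_left]
        intro x hx1 hx2
        rw [Finset.mem_filter] at hx1 hx2
        omega
      unfold blkCard
      rw [hsplit, Finset.card_union_of_disjoint hdisj]
      push_cast
      ring
    · have hrt : r ≠ t := by
        intro h
        rw [h, hmt] at hr
        omega
      have hrr : rho r = r := by
        by_cases h : rho r = t
        · rw [mergeR_of_eq rho s t r h] at hr; omega
        · rw [mergeR_of_ne rho s t r h] at hr; exact hr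
      rw [pvGetI_pvSetI_ne _ _ _ _ hr0 hrs]
      rw [hsz2 r hr0 hrn hrr]
      have hbe : blkCard n rho r = blkCard n (mergeR rho s t) r := by
        unfold blkCard
        congr 1
        apply Finset.filter_congr
        intro x hx
        constructor
        · intro h
          rw [mergeR_of_ne rho s t x (by omega), h]
        · intro h
          by_cases hxt : rho x = t
          · rw [mergeR_of_eq rho s t x hxt] at h; omega
          · rw [mergeR_of_ne rho s t x hxt] at h; exact h
      rw [← hbe]

-- a block of an interval partition is the interval [r, r + card - 1]
theorem blk_Icc (n : Int) (rho : Int → Int) (hP : IPart n rho) (r : Int)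
    (h0 : 0 ≤ r) (hn : r < n) (hr : rho r = r) :
    (IccZ 0 (n-1)).filter (fun j => rho j = r) =
      IccZ r (r + (blkCard n rho r : ℤ) - 1) := by
  unfold blkCard
  have hrB : r ∈ (IccZ 0 (n-1)).filter (fun j => rho j = r) := by
    rw [Finset.mem_filter, mem_IccZ]; exact ⟨⟨h0, by omega⟩, hr⟩
  have hne : ((IccZ 0 (n-1)).filter (fun j => rho j = r)).Nonempty := ⟨r, hrB⟩
  obtain ⟨m, hmB, hmax⟩ : ∃ m, m ∈ (IccZ 0 (n-1)).filter (fun j => rho j = r) ∧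
      ∀ x ∈ (IccZ 0 (n-1)).filter (fun j => rho j = r), x ≤ m :=
    ⟨_, Finset.max'_mem _ hne, fun x hx => Finset.le_max' _ x hx⟩
  have hmr := Finset.mem_filter.mp hmB
  rw [mem_IccZ] at hmr
  have hrm : r ≤ m := hmax r hrB
  have hBeq : (IccZ 0 (n-1)).filter (fun j => rho j = r) = IccZ r m := by
    ext x
    constructor
    · intro hx
      have hle := hmax x hx
      rw [Finset.mem_filter, mem_IccZ] at hx
      rw [mem_IccZ]
      have := (hP x hx.1.1 (by omega)).2.1
      rw [hx.2] at this
      exact ⟨this, hle⟩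
    · intro hx
      rw [mem_IccZ] at hx
      have hx2 := (hP m hmr.1.1 (by omega)).2.2 x (by rw [hmr.2]; omega) hx.2
      rw [Finset.mem_filter, mem_IccZ]
      exact ⟨⟨by omega, by omega⟩, by rw [hx2, hmr.2]⟩
  have hcard : ((((IccZ 0 (n-1)).filter (fun j => rho j = r)).card : ℤ)) = m + 1 - r := by
    rw [hBeq, IccZ_card]; omega
  rw [hBeq] at hcard ⊢
  rw [IccZ_card] at hcard ⊢
  congr 1
  omega

-- ---------- counting lemmas ----------

theorem countIv_empty (n : Int) : countIv n ∅ = 0 := by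
  unfold countIv
  rw [Finset.filter_eq_empty_iff.mpr]
  · simp
  · rintro p hp ⟨hle, hsub⟩
    have : p.1 ∈ IccZ p.1 p.2 := by rw [mem_IccZ]; omega
    exact absurd (hsub this) (Finset.notMem_empty _)

theorem countIv_insert (n : Int) (V : Finset ℤ) (i L R : Int)
    (hi : i ∉ V) (hL0 : 0 ≤ L) (hLi : L ≤ i) (hiR : i ≤ R) (hRn : R < n)
    (hsub : ∀ k, L ≤ k → k ≤ R → k ∈ insert i V)
    (hL1 : (L-1) ∉ insert i V) (hR1 : (R+1) ∉ insert i V) :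
    countIv n (insert i V) = countIv n V + (i - L + 1) * (R - i + 1) := by
  unfold countIv
  set S := (IccZ 0 (n-1)) ×ˢ (IccZ 0 (n-1)) with hS
  have hsplit : S.filter (fun p => p.1 ≤ p.2 ∧ IccZ p.1 p.2 ⊆ insert i V)
      = (S.filter (fun p => p.1 ≤ p.2 ∧ IccZ p.1 p.2 ⊆ V)) ∪ ((IccZ L i) ×ˢ (IccZ i R)) := by
    ext p
    simp only [Finset.mem_filter, Finset.mem_union, Finset.mem_product, mem_IccZ, hS]
    constructor
    · rintro ⟨hp, hle, hsub⟩
      by_cases hiIn : p.1 ≤ i ∧ i ≤ p.2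
      · right
        constructor
        · refine ⟨?_, hiIn.1⟩
          by_contra hcon
          exact hL1 (hsub (by rw [mem_IccZ]; omega))
        · refine ⟨hiIn.2, ?_⟩
          by_contra hcon
          exact hR1 (hsub (by rw [mem_IccZ]; omega))
      · left
        refine ⟨hp, hle, ?_⟩
        intro x hx
        have hxm := hx
        rw [mem_IccZ] at hxm
        rcases Finset.mem_insert.mp (hsub hx) with h | h
        · exfalso; omega
        · exact h
    · rintro (⟨hp, hle, hsub⟩ | ⟨⟨h1, h2⟩, h3, h4⟩)
      · exact ⟨hp, hle, fun x hx => Finset.mem_insert_of_mem (hsub hx)⟩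
      · refine ⟨⟨⟨by omega, by omega⟩, by omega, by omega⟩, by omega, ?_⟩
        intro x hx
        rw [mem_IccZ] at hx
        exact hsub x (by omega) (by omega)
  have hdisj : Disjoint (S.filter (fun p => p.1 ≤ p.2 ∧ IccZ p.1 p.2 ⊆ V)) ((IccZ L i) ×ˢ (IccZ i R)) := by
    rw [Finset.disjoint_left]
    rintro p hp hq
    rw [Finset.mem_filter] at hp
    rw [Finset.mem_product, mem_IccZ, mem_IccZ] at hq
    have : i ∈ IccZ p.1 p.2 := by rw [mem_IccZ]; omega
    exact hi (hp.2.2 this)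
  rw [hsplit, Finset.card_union_of_disjoint hdisj, Finset.card_product, IccZ_card, IccZ_card]
  have e1 : (((i + 1 - L).toNat : ℤ)) = i + 1 - L := by omega
  have e2 : (((R + 1 - i).toNat : ℤ)) = R + 1 - i := by omega
  push_cast
  rw [e1, e2]
  ring

theorem countIv_full (n : Int) (hn : 0 ≤ n) :
    countIv n (IccZ 0 (n-1)) = PySem.Int.floordiv (n*(n+1)) 2 := by
  unfold countIv
  set S := (IccZ 0 (n-1)) ×ˢ (IccZ 0 (n-1)) with hS
  have hfoo : S.filter (fun p => p.1 ≤ p.2 ∧ IccZ p.1 p.2 ⊆ IccZ 0 (n-1))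
      = S.filter (fun p => p.1 ≤ p.2) := by
    apply Finset.filter_congr
    intro p hp
    rw [hS, Finset.mem_product, mem_IccZ, mem_IccZ] at hp
    constructor
    · exact fun h => h.1
    · intro h
      refine ⟨h, ?_⟩
      intro x hx
      rw [mem_IccZ] at hx ⊢
      omega
  rw [hfoo]
  set A := S.filter (fun p => p.1 ≤ p.2) with hA
  set B := S.filter (fun p => p.2 ≤ p.1) with hBB
  have hswap : A.image Prod.swap = B := by
    ext p
    simp only [Finset.mem_image, hA, hBB, Finset.mem_filter, hS, Finset.mem_product]
    constructor
    · rintro ⟨q, ⟨⟨hq1, hq2⟩, hle⟩, rfl⟩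
      exact ⟨⟨hq2, hq1⟩, hle⟩
    · rintro ⟨⟨hp1, hp2⟩, hle⟩
      exact ⟨p.swap, ⟨⟨hp2, hp1⟩, hle⟩, Prod.swap_swap p⟩
  have hAB : A.card = B.card := by
    rw [← hswap, Finset.card_image_of_injective _ Prod.swap_injective]
  have hunion : A ∪ B = S := by
    ext p
    simp only [Finset.mem_union, hA, hBB, Finset.mem_filter]
    constructor
    · rintro (h | h) <;> exact h.1
    · intro h
      rcases le_total p.1 p.2 with hle | hle
      · exact Or.inl ⟨h, hle⟩
      · exact Or.inr ⟨h, hle⟩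
  have hinter : A ∩ B = S.filter (fun p => p.1 = p.2) := by
    ext p
    simp only [Finset.mem_inter, hA, hBB, Finset.mem_filter]
    constructor
    · rintro ⟨⟨h1, h2⟩, _, h3⟩
      exact ⟨h1, by omega⟩
    · rintro ⟨h1, h2⟩
      exact ⟨⟨h1, by omega⟩, h1, by omega⟩
  have hdiag : (S.filter (fun p => p.1 = p.2)) = (IccZ 0 (n-1)).image (fun x => (x, x)) := by
    ext p
    simp only [Finset.mem_filter, Finset.mem_image, hS, Finset.mem_product]
    constructor
    · rintro ⟨⟨h1, h2⟩, h3⟩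
      refine ⟨p.1, h1, ?_⟩
      obtain ⟨a, b⟩ := p
      simp only at h3 ⊢
      rw [h3]
    · rintro ⟨x, hx, rfl⟩
      exact ⟨⟨hx, hx⟩, rfl⟩
  have hdiagcard : (S.filter (fun p => p.1 = p.2)).card = n.toNat := by
    rw [hdiag, Finset.card_image_of_injective _ (fun x y hxy => by simpa using congrArg Prod.fst hxy), IccZ_card]
    omega
  have hScard : S.card = n.toNat * n.toNat := by
    rw [hS, Finset.card_product, IccZ_card]
    have : (n - 1 + 1 - 0).toNat = n.toNat := by omega
    rw [this]
  have hsum : A.card + B.card = n.toNat * n.toNat + n.toNat := by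
    rw [← Finset.card_union_add_card_inter, hunion, hinter, hdiagcard, hScard]
  have h2c : 2 * (A.card : ℤ) = n * n + n := by
    have hc : (A.card : ℤ) + (B.card : ℤ) = (n.toNat : ℤ) * (n.toNat : ℤ) + (n.toNat : ℤ) := by
      exact_mod_cast congrArg (fun x : ℕ => (x : ℤ)) hsum
    have hn' : ((n.toNat : ℤ)) = n := by omega
    rw [hn'] at hc
    have hab : (A.card : ℤ) = (B.card : ℤ) := by exact_mod_cast hAB
    omega
  rw [PySem.Int.floordiv_eq_ediv_of_pos (by norm_num)]
  have hmul : n * (n + 1) = 2 * (A.card : ℤ) := by rw [h2c]; ring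
  rw [hmul, Int.mul_ediv_cancel_left _ (by norm_num)]

-- ---------- the per-element step ----------

-- where the run-left map lands after inserting one element
theorem rhoV_mem_of_mem (V : Finset ℤ) (hV : ∀ x ∈ V, 0 ≤ x) (j : Int) (hj : j ∈ V) :
    rhoV V j ∈ V := by
  have h := rhoV_mem_spec V hV j hj
  exact h.2.2.1 (rhoV V j) (le_refl _) h.1

theorem rhoV_insert (V : Finset ℤ) (hVnn : ∀ x ∈ V, 0 ≤ x) (i : Int) (_hi : i ∉ V) (h0 : 0 ≤ i)
    (j : Int) :
    rhoV (insert i V) j =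
      if j ∈ V then
        (if rhoV V j = i + 1 then (if (i-1) ∈ V then rhoV V (i-1) else i) else rhoV V j)
      else if j = i then (if (i-1) ∈ V then rhoV V (i-1) else i) else j := by
  have hV'nn : ∀ x ∈ insert i V, 0 ≤ x := by
    intro x hx
    rcases Finset.mem_insert.mp hx with h | h
    · omega
    · exact hVnn x h
  have hLfact : (if (i-1) ∈ V then rhoV V (i-1) else i) ≤ i ∧
      0 ≤ (if (i-1) ∈ V then rhoV V (i-1) else i) ∧
      (∀ k, (if (i-1) ∈ V then rhoV V (i-1) else i) ≤ k → k ≤ i → k ∈ insert i V) ∧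
      ((if (i-1) ∈ V then rhoV V (i-1) else i) - 1) ∉ insert i V := by
    by_cases hm1 : (i-1) ∈ V
    · rw [if_pos hm1]
      have hs := rhoV_mem_spec V hVnn (i-1) hm1
      refine ⟨by omega, hs.2.1, ?_, ?_⟩
      · intro k hk1 hk2
        rcases lt_or_ge k i with h | h
        · exact Finset.mem_insert_of_mem (hs.2.2.1 k hk1 (by omega))
        · have : k = i := by omega
          rw [this]; exact Finset.mem_insert_self i V
      · rw [Finset.mem_insert]
        rintro (h | h)
        · omega
        · exact hs.2.2.2 h
    · rw [if_neg hm1]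
      refine ⟨le_refl _, h0, ?_, ?_⟩
      · intro k hk1 hk2
        have : k = i := by omega
        rw [this]; exact Finset.mem_insert_self i V
      · rw [Finset.mem_insert]
        rintro (h | h)
        · omega
        · exact hm1 (by simpa using h)
  by_cases hjV : j ∈ V
  · rw [if_pos hjV]
    have hs := rhoV_mem_spec V hVnn j hjV
    by_cases hr1 : rhoV V j = i + 1
    · rw [if_pos hr1]
      apply rhoV_char (insert i V) hV'nn j _ (by omega) ?_ hLfact.2.2.2
      intro k hk1 hk2
      rcases le_or_gt k i with h | h
      · exact hLfact.2.2.1 k hk1 h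
      · exact Finset.mem_insert_of_mem (hs.2.2.1 k (by omega) hk2)
    · rw [if_neg hr1]
      apply rhoV_char (insert i V) hV'nn j _ hs.1
        (fun k hk1 hk2 => Finset.mem_insert_of_mem (hs.2.2.1 k hk1 hk2))
      rw [Finset.mem_insert]
      rintro (h | h)
      · exact hr1 (by omega)
      · exact hs.2.2.2 h
  · rw [if_neg hjV]
    by_cases hji : j = i
    · rw [if_pos hji, hji]
      exact rhoV_char (insert i V) hV'nn i _ hLfact.1 hLfact.2.2.1 hLfact.2.2.2
    · rw [if_neg hji]
      apply rhoV_not_mem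
      rw [Finset.mem_insert]
      rintro (h | h)
      · exact hji h
      · exact hjV h



theorem step_inv (n : Int) (V : Finset ℤ) (st : List Int × List Int × Int × List Int × Int)
    (x i : Int) (hfull : FullInv n V st) (h0 : 0 ≤ i) (hn : i < n) (hi : i ∉ V) :
    FullInv n (insert i V) (pvStep n st (x, i)) := by
  obtain ⟨hVr, hvl, hvis, hdsu, hret⟩ := hfull
  have hVnn : ∀ y ∈ V, 0 ≤ y := fun y hy => (hVr y hy).1
  have hV'r : ∀ y ∈ insert i V, 0 ≤ y ∧ y < n := by
    intro y hy
    rcases Finset.mem_insert.mp hy with h | h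
    · rw [h]; exact ⟨h0, hn⟩
    · exact hVr y h
  have hV'nn : ∀ y ∈ insert i V, 0 ≤ y := fun y hy => (hV'r y hy).1
  set vis1 := pvSetI st.2.2.2.1 i 1 with hv1def
  have hvis1 : ∀ j, 0 ≤ j → j < n →
      pvGetI vis1 j = (if j ∈ insert i V then 1 else 0) := by
    intro j hj0 hjn
    by_cases hji : j = i
    · rw [hji, hv1def, pvGetI_pvSetI_self _ _ _ h0 (by omega),
        if_pos (Finset.mem_insert_self i V)]
    · rw [hv1def, pvGetI_pvSetI_ne _ _ _ _ hj0 hji, hvis j hj0 hjn]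
      by_cases hjv : j ∈ V
      · rw [if_pos hjv, if_pos (Finset.mem_insert_of_mem hjv)]
      · rw [if_neg hjv, if_neg (by rw [Finset.mem_insert]; rintro (h | h); exact hji h; exact hjv h)]
  set u1 := pvInner n st.1 st.2.1 st.2.2.1 vis1 i (i-1) with hu1def
  set u2 := pvInner n u1.1 u1.2.1 u1.2.2 vis1 i (i+1) with hu2def
  set f1 := pvFind u2.1 i with hf1def
  set f2 := pvFind f1.2 i with hf2def
  have hstep : pvStep n st (x, i) = (f2.2, u2.2.1, u2.2.2, vis1,
      st.2.2.2.2 + (i - f1.1 + 1) * ((f1.1 + pvGetI u2.2.1 f2.1 - 1) - i + 1)) := rfl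
  rw [hstep]
  have hrhoAi : rhoV V i = i := rhoV_not_mem V i hi
  have hdsu2 : DSUInv n (rhoV (insert i V)) u2.1 u2.2.1 := by
    by_cases hm1 : (i-1) ∈ V
    · have hL1spec := rhoV_mem_spec V hVnn (i-1) hm1
      have hcond1 : (0 ≤ i-1 ∧ i-1 < n ∧ pvGetI vis1 (i-1) ≠ 0) := by
        have h1 := hVr _ hm1
        refine ⟨by omega, by omega, ?_⟩
        rw [hvis1 (i-1) (by omega) (by omega), if_pos (Finset.mem_insert_of_mem hm1)]
        norm_num
      have hu1eq : u1 = pvUnion st.1 st.2.1 st.2.2.1 i (i-1) := by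
        rw [hu1def]; unfold pvInner; rw [if_pos hcond1]
      have hA : DSUInv n (mergeR (rhoV V) (rhoV V (i-1)) i) u1.1 u1.2.1 := by
        rw [hu1eq]
        exact union_spec n (rhoV V) st.1 st.2.1 st.2.2.1 i (i-1) (rhoV V (i-1)) i hdsu
          h0 hn (by omega) (by omega) (Or.inr ⟨rfl, hrhoAi.symm⟩) (by omega)
          (fun k hk1 hk2 => rhoV_congr_run V hVnn (i-1) k hm1 hk1 (by omega))
      by_cases hm2 : (i+1) ∈ V
      · have hsucc : rhoV V (i+1) = i+1 := by
          apply rhoV_char V hVnn (i+1) (i+1) (le_refl _)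
          · intro k hk1 hk2
            have : k = i+1 := by omega
            rw [this]; exact hm2
          · simpa using hi
        have hcond2 : (0 ≤ i+1 ∧ i+1 < n ∧ pvGetI vis1 (i+1) ≠ 0) := by
          have h1 := hVr _ hm2
          refine ⟨by omega, by omega, ?_⟩
          rw [hvis1 (i+1) (by omega) (by omega), if_pos (Finset.mem_insert_of_mem hm2)]
          norm_num
        have hu2eq : u2 = pvUnion u1.1 u1.2.1 u1.2.2 i (i+1) := by
          rw [hu2def]; unfold pvInner; rw [if_pos hcond2]
        have hB : DSUInv n (mergeR (mergeR (rhoV V) (rhoV V (i-1)) i) (rhoV V (i-1)) (i+1))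
            u2.1 u2.2.1 := by
          rw [hu2eq]
          apply union_spec n (mergeR (rhoV V) (rhoV V (i-1)) i) u1.1 u1.2.1 u1.2.2 i (i+1)
            (rhoV V (i-1)) (i+1) hA h0 hn (by omega) (hVr _ hm2).2
          · exact Or.inl ⟨(mergeR_of_eq _ _ _ i (by rw [hrhoAi])).symm,
              ((mergeR_of_ne _ _ _ (i+1) (by rw [hsucc]; omega)).trans hsucc).symm⟩
          · omega
          · intro k hk1 hk2
            by_cases hki : k = i
            · rw [hki]; exact mergeR_of_eq _ _ _ i (by rw [hrhoAi])
            · have hrk : rhoV V k = rhoV V (i-1) :=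
                rhoV_congr_run V hVnn (i-1) k hm1 hk1 (by omega)
              rw [mergeR_of_ne _ _ _ k (by rw [hrk]; omega)]
              exact hrk
        apply DSUInv_congr n _ _ _ _ ?_ hB
        intro j hj0 hjn
        rw [rhoV_insert V hVnn i hi h0 j]
        simp only [hm1, if_true]
        by_cases hjV : j ∈ V
        · rw [if_pos hjV]
          have hs := rhoV_mem_spec V hVnn j hjV
          have hrne : rhoV V j ≠ i := fun h => hi (h ▸ rhoV_mem_of_mem V hVnn j hjV)
          have hinner : mergeR (rhoV V) (rhoV V (i-1)) i j = rhoV V j :=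
            mergeR_of_ne _ _ _ j hrne
          by_cases hr1 : rhoV V j = i + 1
          · rw [if_pos hr1, mergeR_of_eq _ _ _ j (by rw [hinner]; exact hr1)]
          · rw [if_neg hr1, mergeR_of_ne _ _ _ j (by rw [hinner]; exact hr1), hinner]
        · rw [if_neg hjV]
          by_cases hji : j = i
          · rw [if_pos hji, hji]
            have hinner : mergeR (rhoV V) (rhoV V (i-1)) i i = rhoV V (i-1) :=
              mergeR_of_eq _ _ _ i (by rw [hrhoAi])
            rw [mergeR_of_ne _ _ _ i (by rw [hinner]; omega)]
            exact hinner
          · rw [if_neg hji]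
            have hji' : rhoV V j = j := rhoV_not_mem V j hjV
            have hinner : mergeR (rhoV V) (rhoV V (i-1)) i j = j := by
              rw [mergeR_of_ne _ _ _ j (by rw [hji']; exact hji)]
              exact hji'
            rw [mergeR_of_ne _ _ _ j (by rw [hinner]; intro h; exact hjV (by rw [h]; exact hm2))]
            exact hinner
      · have hcond2f : ¬(0 ≤ i+1 ∧ i+1 < n ∧ pvGetI vis1 (i+1) ≠ 0) := by
          rintro ⟨hc1, hc2, hc3⟩
          apply hc3
          rw [hvis1 (i+1) (by omega) hc2, if_neg]
          rw [Finset.mem_insert]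
          rintro (h | h)
          · omega
          · exact hm2 h
        have hu2eq : u2 = (u1.1, u1.2.1, u1.2.2) := by
          rw [hu2def]; unfold pvInner; rw [if_neg hcond2f]
        rw [hu2eq]
        apply DSUInv_congr n _ _ _ _ ?_ hA
        intro j hj0 hjn
        rw [rhoV_insert V hVnn i hi h0 j]
        simp only [hm1, if_true]
        by_cases hjV : j ∈ V
        · rw [if_pos hjV]
          have hrne : rhoV V j ≠ i := fun h => hi (h ▸ rhoV_mem_of_mem V hVnn j hjV)
          have hr1 : rhoV V j ≠ i + 1 := fun h => hm2 (h ▸ rhoV_mem_of_mem V hVnn j hjV)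
          rw [if_neg hr1]
          exact mergeR_of_ne _ _ _ j hrne
        · rw [if_neg hjV]
          by_cases hji : j = i
          · rw [if_pos hji, hji]
            exact mergeR_of_eq _ _ _ i (by rw [hrhoAi])
          · rw [if_neg hji]
            have hji' : rhoV V j = j := rhoV_not_mem V j hjV
            rw [mergeR_of_ne _ _ _ j (by rw [hji']; exact hji)]
            exact hji'
    · have hcond1f : ¬(0 ≤ i-1 ∧ i-1 < n ∧ pvGetI vis1 (i-1) ≠ 0) := by
        rintro ⟨hc1, hc2, hc3⟩
        apply hc3
        rw [hvis1 (i-1) hc1 hc2, if_neg]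
        rw [Finset.mem_insert]
        rintro (h | h)
        · omega
        · exact hm1 h
      have hu1eq : u1 = (st.1, st.2.1, st.2.2.1) := by
        rw [hu1def]; unfold pvInner; rw [if_neg hcond1f]
      have hA : DSUInv n (rhoV V) u1.1 u1.2.1 := by rw [hu1eq]; exact hdsu
      by_cases hm2 : (i+1) ∈ V
      · have hsucc : rhoV V (i+1) = i+1 := by
          apply rhoV_char V hVnn (i+1) (i+1) (le_refl _)
          · intro k hk1 hk2
            have : k = i+1 := by omega
            rw [this]; exact hm2
          · simpa using hi
        have hcond2 : (0 ≤ i+1 ∧ i+1 < n ∧ pvGetI vis1 (i+1) ≠ 0) := by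
          have h1 := hVr _ hm2
          refine ⟨by omega, by omega, ?_⟩
          rw [hvis1 (i+1) (by omega) (by omega), if_pos (Finset.mem_insert_of_mem hm2)]
          norm_num
        have hu2eq : u2 = pvUnion u1.1 u1.2.1 u1.2.2 i (i+1) := by
          rw [hu2def]; unfold pvInner; rw [if_pos hcond2]
        have hB : DSUInv n (mergeR (rhoV V) i (i+1)) u2.1 u2.2.1 := by
          rw [hu2eq]
          apply union_spec n (rhoV V) u1.1 u1.2.1 u1.2.2 i (i+1) i (i+1) hA
            h0 hn (by omega) (hVr _ hm2).2 (Or.inl ⟨hrhoAi.symm, hsucc.symm⟩) (by omega)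
          intro k hk1 hk2
          have : k = i := by omega
          rw [this]; exact hrhoAi
        apply DSUInv_congr n _ _ _ _ ?_ hB
        intro j hj0 hjn
        rw [rhoV_insert V hVnn i hi h0 j]
        simp only [hm1, if_false]
        by_cases hjV : j ∈ V
        · rw [if_pos hjV]
          by_cases hr1 : rhoV V j = i + 1
          · rw [if_pos hr1]
            exact mergeR_of_eq _ _ _ j hr1
          · rw [if_neg hr1]
            exact mergeR_of_ne _ _ _ j hr1
        · rw [if_neg hjV]
          by_cases hji : j = i
          · rw [if_pos hji, hji]
            rw [mergeR_of_ne _ _ _ i (by rw [hrhoAi]; omega)]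
            exact hrhoAi
          · rw [if_neg hji]
            have hji' : rhoV V j = j := rhoV_not_mem V j hjV
            rw [mergeR_of_ne _ _ _ j (by rw [hji']; intro h; exact hjV (by rw [h]; exact hm2))]
            exact hji'
      · have hcond2f : ¬(0 ≤ i+1 ∧ i+1 < n ∧ pvGetI vis1 (i+1) ≠ 0) := by
          rintro ⟨hc1, hc2, hc3⟩
          apply hc3
          rw [hvis1 (i+1) (by omega) hc2, if_neg]
          rw [Finset.mem_insert]
          rintro (h | h)
          · omega
          · exact hm2 h
        have hu2eq : u2 = (u1.1, u1.2.1, u1.2.2) := by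
          rw [hu2def]; unfold pvInner; rw [if_neg hcond2f]
        rw [hu2eq]
        apply DSUInv_congr n _ _ _ _ ?_ hA
        intro j hj0 hjn
        rw [rhoV_insert V hVnn i hi h0 j]
        simp only [hm1, if_false]
        by_cases hjV : j ∈ V
        · rw [if_pos hjV]
          have hr1 : rhoV V j ≠ i + 1 := fun h => hm2 (h ▸ rhoV_mem_of_mem V hVnn j hjV)
          rw [if_neg hr1]
        · rw [if_neg hjV]
          by_cases hji : j = i
          · rw [if_pos hji, hji]; exact hrhoAi
          · rw [if_neg hji]
            exact rhoV_not_mem V j hjV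
  -- common tail: find twice, block size, count update
  have hfind1 := find_spec n (rhoV (insert i V)) u2.1 u2.2.1 i hdsu2 h0 hn
  have hL : f1.1 = rhoV (insert i V) i := by rw [hf1def]; exact hfind1.1
  have hfind2 := find_spec n (rhoV (insert i V)) f1.2 u2.2.1 i hfind1.2 h0 hn
  have hL2 : f2.1 = rhoV (insert i V) i := by rw [hf2def]; exact hfind2.1
  have hiV' : i ∈ insert i V := Finset.mem_insert_self i V
  have hspec' := rhoV_mem_spec (insert i V) hV'nn i hiV'
  have hroot : rhoV (insert i V) (rhoV (insert i V) i) = rhoV (insert i V) i :=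
    rhoV_congr_run (insert i V) hV'nn i (rhoV (insert i V) i) hiV' (le_refl _) hspec'.1
  have hsz : pvGetI u2.2.1 (rhoV (insert i V) i)
      = blkCard n (rhoV (insert i V)) (rhoV (insert i V) i) :=
    hdsu2.2.2.2.2 (rhoV (insert i V) i) hspec'.2.1 (by omega) hroot
  have hBeq := blk_Icc n (rhoV (insert i V)) hdsu2.2.2.1 (rhoV (insert i V) i)
    hspec'.2.1 (by omega) hroot
  set L : Int := rhoV (insert i V) i with hLdef
  set R : Int := L + (blkCard n (rhoV (insert i V)) L : ℤ) - 1 with hRdef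
  have hiB : i ∈ IccZ L R := by
    rw [← hBeq, Finset.mem_filter, mem_IccZ]
    exact ⟨⟨h0, by omega⟩, rfl⟩
  have hiR : i ≤ R := (mem_IccZ _ _ _ |>.mp hiB).2
  have hRn : R < n := by
    have hRB : R ∈ IccZ L R := by rw [mem_IccZ]; constructor <;> omega
    rw [← hBeq, Finset.mem_filter, mem_IccZ] at hRB
    omega
  have hLV' : L ∈ insert i V := hspec'.2.2.1 L (le_refl _) hspec'.1
  have hsub : ∀ k, L ≤ k → k ≤ R → k ∈ insert i V := by
    intro k hk1 hk2
    have hkB : k ∈ IccZ L R := by rw [mem_IccZ]; exact ⟨hk1, hk2⟩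
    rw [← hBeq, Finset.mem_filter] at hkB
    by_contra hknot
    have := rhoV_not_mem (insert i V) k hknot
    rw [this] at hkB
    rw [hkB.2] at hknot
    exact hknot hLV'
  have hR1 : (R+1) ∉ insert i V := by
    intro hmem'
    have hb := hV'r _ hmem'
    have hr := rhoV_mem_spec (insert i V) hV'nn (R+1) hmem'
    rcases eq_or_lt_of_le hr.1 with h | h
    · apply hr.2.2.2
      have he : rhoV (insert i V) (R+1) - 1 = R := by omega
      rw [he]
      exact hsub R (by omega) (le_refl _)
    · have hRV : rhoV (insert i V) R = rhoV (insert i V) (R+1) :=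
        rhoV_congr_run (insert i V) hV'nn (R+1) R hmem' (by omega) (by omega)
      have hRB : R ∈ IccZ L R := by rw [mem_IccZ]; constructor <;> omega
      rw [← hBeq, Finset.mem_filter] at hRB
      have hR1L : rhoV (insert i V) (R+1) = L := by rw [← hRV, hRB.2]
      have hR1B : (R+1) ∈ IccZ L R := by
        rw [← hBeq, Finset.mem_filter, mem_IccZ]
        exact ⟨⟨by omega, by omega⟩, hR1L⟩
      rw [mem_IccZ] at hR1B
      omega
  have hL1 : (L-1) ∉ insert i V := hspec'.2.2.2
  have hcount := countIv_insert n V i L R hi hspec'.2.1 hspec'.1 hiR hRn hsub hL1 hR1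
  refine ⟨hV'r, ?_, ?_, ?_, ?_⟩
  · show vis1.length = n.toNat
    rw [hv1def, pvSetI_length]; exact hvl
  · exact hvis1
  · exact hfind2.2
  · show st.2.2.2.2 + (i - f1.1 + 1) * ((f1.1 + pvGetI u2.2.1 f2.1 - 1) - i + 1)
      = countIv n (insert i V)
    rw [hret, hL, hL2, hsz, hcount, hRdef]

theorem loop_inv (n : Int) :
    ∀ (l : List (Int × Int)) (V : Finset ℤ) (st : List Int × List Int × Int × List Int × Int),
      FullInv n V st → (l.map (fun p => p.2)).Nodup →
      (∀ p ∈ l, 0 ≤ p.2 ∧ p.2 < n ∧ p.2 ∉ V) →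
      FullInv n (V ∪ (l.map (fun p => p.2)).toFinset) (l.foldl (pvStep n) st) := by
  intro l
  induction l with
  | nil =>
      intro V st hfull _ _
      simpa using hfull
  | cons p tl ih =>
      intro V st hfull hnd hmem
      have hnd' : (tl.map (fun p => p.2)).Nodup := (List.nodup_cons.mp hnd).2
      have hp := hmem p List.mem_cons_self
      have hstep := step_inv n V st p.1 p.2 hfull hp.1 hp.2.1 hp.2.2
      have hset : V ∪ ((p :: tl).map (fun p => p.2)).toFinset
          = insert p.2 V ∪ (tl.map (fun p => p.2)).toFinset := by
        simp only [List.map_cons, List.toFinset_cons]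
        rw [Finset.union_insert, Finset.insert_union]
      rw [hset]
      have := ih (insert p.2 V) (pvStep n st (p.1, p.2)) hstep hnd' ?_
      · simpa using this
      · intro q hq
        have hq' := hmem q (List.mem_cons_of_mem _ hq)
        refine ⟨hq'.1, hq'.2.1, ?_⟩
        rw [Finset.mem_insert]
        rintro (h | h)
        · apply (List.nodup_cons.mp hnd).1
          have : q.2 ∈ tl.map (fun p => p.2) := List.mem_map_of_mem hq
          rwa [h] at this
        · exact hq'.2.2 h

theorem init_inv (arr : List Int) :
    FullInv (arr.length : Int) ∅
      (PySem.List.pyRange 0 (arr.length : Int) 1, List.replicate arr.length (1:Int),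
       (arr.length : Int), List.replicate arr.length (0:Int), (0:Int)) := by
  have hnn : (0:Int) ≤ (arr.length : Int) := by positivity
  have htn : ((arr.length : Int)).toNat = arr.length := by omega
  refine ⟨by simp, by simp [htn], ?_, ?_, ?_⟩
  · intro j h0 hn
    rw [pvGetI_eq_getElem _ _ h0 (by simp; omega)]
    simp
  · refine ⟨by simp [PySem.List.length_pyRange_one, htn], by simp [htn],
      IPart_rhoV _ _ (by simp), ?_, ?_⟩
    · intro j h0 hn
      have hgp : pvGetI (PySem.List.pyRange 0 (arr.length : Int) 1) j = j := by
        rw [pvGetI_eq_getElem _ _ h0 (by rw [PySem.List.length_pyRange_one]; omega)]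
        rw [PySem.List.getElem_pyRange_one]
        omega
      rw [hgp, rhoV_not_mem _ _ (Finset.notMem_empty j)]
      exact ⟨rhoV_not_mem _ _ (Finset.notMem_empty j), le_refl _, le_refl _, by simp⟩
    · intro r h0 hn hr
      rw [pvGetI_eq_getElem _ _ h0 (by simp; omega)]
      have hbc : blkCard (arr.length : Int) (rhoV ∅) r = 1 := by
        unfold blkCard
        have he : (IccZ 0 ((arr.length : Int)-1)).filter (fun j => rhoV ∅ j = r)
            = (IccZ 0 ((arr.length : Int)-1)).filter (fun j => j = r) := by
          apply Finset.filter_congr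
          intro x hx
          rw [rhoV_not_mem _ _ (Finset.notMem_empty x)]
        rw [he, Finset.filter_eq']
        rw [if_pos (by rw [mem_IccZ]; omega)]
        simp
      rw [hbc]
      simp
  · exact (countIv_empty _).symm


-- ===== VERDICT (by name: the statement is the Claim_ definition above) =====
theorem number_max_profit_groups_spec : Claim_equal_number_max_profit_groups := by
  intro arr _
  unfold Spec_number_max_profit_groups number_max_profit_groups number_max_profit_groups_alt
  simp only []
  set n : Int := (arr.length : Int) with hn
  set l := PySem.List.sorted2 (arr.zip (PySem.List.pyRange 0 n 1)) (fun p => p.1) (fun p => p.2)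
    with hl
  have hnn : (0:Int) ≤ n := by positivity
  have hlen : (PySem.List.pyRange 0 n 1).length = arr.length := by
    rw [PySem.List.length_pyRange_one]; omega
  have hperm : (l.map (fun p => p.2)).Perm (PySem.List.pyRange 0 n 1) := by
    have h1 : l.Perm (arr.zip (PySem.List.pyRange 0 n 1)) :=
      PySem.List.sorted2_perm _ _ _ _
    have h2 := h1.map (fun p : Int × Int => p.2)
    have h3 : List.map (fun p : Int × Int => p.2) (arr.zip (PySem.List.pyRange 0 n 1))
        = PySem.List.pyRange 0 n 1 := List.map_snd_zip (by omega)
    rwa [h3] at h2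
  have hnodup : (l.map (fun p => p.2)).Nodup :=
    hperm.nodup_iff.mpr (PySem.List.nodup_pyRange_one 0 n)
  have hmem : ∀ p ∈ l, 0 ≤ p.2 ∧ p.2 < n ∧ p.2 ∉ (∅ : Finset ℤ) := by
    intro p hp
    have : p.2 ∈ l.map (fun p => p.2) := List.mem_map_of_mem hp
    have := hperm.mem_iff.mp this
    rw [PySem.List.mem_pyRange_one] at this
    exact ⟨this.1, this.2, Finset.notMem_empty _⟩
  have hfin := loop_inv n l ∅
    (PySem.List.pyRange 0 n 1, List.replicate arr.length (1:Int), n,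
     List.replicate arr.length (0:Int), (0:Int))
    (init_inv arr) hnodup hmem
  have hset : (∅ : Finset ℤ) ∪ (l.map (fun p => p.2)).toFinset = IccZ 0 (n-1) := by
    rw [Finset.empty_union, List.toFinset_eq_of_perm _ _ hperm]
    ext x
    rw [List.mem_toFinset, PySem.List.mem_pyRange_one, mem_IccZ]
    omega
  rw [hset] at hfin
  rw [hfin.2.2.2.2, countIv_full n hnn]
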